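-- pv_equiv track=rewrite | github.com/baden/api.navi.cc | src/libraries/web.py | determinate_mode
-- ===== SOURCE A (Python) =====
-- from types import FunctionType
--
-- FILTER_INCLUDE = 1
--
-- FILTER_EXCLUDE = 0
--
-- def determinate_mode(filter_settings):
--     mode = None
--     for action in filter_settings.values():
--         if type(action) == FunctionType:
--             continue
--         if (action == FILTER_INCLUDE or action == FILTER_EXCLUDE):
--             if mode == None:
--                 mode = action
--                 continue
--             if action != mode:
--                 raise ValueError("Multiple modes detected")
--     if mode == None: mode = FILTER_INCLUDE
--     return mode
-- ===== SOURCE B (Python) =====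
-- FILTER_INCLUDE = 1
--
-- FILTER_EXCLUDE = 0
--
-- def determinate_mode(filter_settings):
--     vals = list(filter_settings.values())
--     has_exclude = FILTER_EXCLUDE in vals
--     has_include = FILTER_INCLUDE in vals
--     if has_exclude and has_include:
--         raise ValueError("Multiple modes detected")
--     return FILTER_EXCLUDE if has_exclude else FILTER_INCLUDE
-- ===== Notes on version B (the rewrite author's own statement) =====
-- stated objective: simpler
-- what changed: B replaces A's per-element loop with a running mode accumulator and in-loop conflict check by two whole-list membership tests (is FILTER_EXCLUDE present? is FILTER_INCLUDE present?) and a single final decision; both raise ValueError exactly when both modes occur, so Pre_ excludes dicts whose values contain both 0 and 1.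
import Mathlib
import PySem

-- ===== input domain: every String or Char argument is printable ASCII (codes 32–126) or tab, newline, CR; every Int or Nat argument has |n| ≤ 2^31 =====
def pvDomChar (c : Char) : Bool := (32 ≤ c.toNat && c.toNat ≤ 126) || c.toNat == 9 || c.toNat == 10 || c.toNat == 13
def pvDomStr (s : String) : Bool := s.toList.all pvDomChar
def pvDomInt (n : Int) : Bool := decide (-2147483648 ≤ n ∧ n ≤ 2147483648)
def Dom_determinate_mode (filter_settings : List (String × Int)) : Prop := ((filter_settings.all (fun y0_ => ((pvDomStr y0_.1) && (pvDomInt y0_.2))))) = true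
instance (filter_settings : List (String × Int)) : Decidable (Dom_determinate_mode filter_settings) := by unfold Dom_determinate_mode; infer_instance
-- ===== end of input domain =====

-- B decides by two whole-list membership tests (0 present? 1 present?) and one final branch,
-- instead of A's per-element loop with a running-mode accumulator (objective: simpler).
-- Values are Int here, so A's 'type(action) == FunctionType' test is always false and is not ported.

-- ===== PORT A =====
-- Loop over the dict's values with the running `mode` (Option Int; none = Python's None).
-- Outer `none` marks the `raise ValueError("Multiple modes detected")` path (excluded by Pre_).
def dmLoopA : Option Int → List Int → Option (Option Int)
  | mode, [] => some mode
  | mode, action :: rest =>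
    if action = 1 ∨ action = 0 then
      match mode with
      | none => dmLoopA (some action) rest
      | some m => if action ≠ m then none else dmLoopA (some m) rest
    else dmLoopA mode rest

def determinate_mode (filter_settings : List (String × Int)) : Int :=
  match dmLoopA none (filter_settings.map Prod.snd) with
  | some (some m) => m
  | some none => 1          -- if mode == None: mode = FILTER_INCLUDE
  | none => 0               -- raise path; excluded by Pre_determinate_mode

-- ===== PORT B =====
def determinate_mode_alt (filter_settings : List (String × Int)) : Int :=
  let vals := filter_settings.map Prod.snd
  let hasExclude := vals.contains (0 : Int)   -- FILTER_EXCLUDE in vals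
  let hasInclude := vals.contains (1 : Int)   -- FILTER_INCLUDE in vals
  if hasExclude && hasInclude then 0          -- raise path; excluded by Pre_determinate_mode
  else if hasExclude then 0 else 1

-- ===== PRECONDITION & SPEC =====
-- Pre_ excludes exactly the inputs on which A raises ValueError: dicts whose values contain
-- both FILTER_INCLUDE (1) and FILTER_EXCLUDE (0).
def Pre_determinate_mode (filter_settings : List (String × Int)) : Prop :=
  ¬ ((0 : Int) ∈ filter_settings.map Prod.snd ∧ (1 : Int) ∈ filter_settings.map Prod.snd)
instance (filter_settings : List (String × Int)) : Decidable (Pre_determinate_mode filter_settings) := by unfold Pre_determinate_mode; infer_instance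

def pvWitness_determinate_mode : (List (String × Int)) := [("a", 5), ("b", 0), ("c", 0)]

def Spec_determinate_mode (filter_settings : List (String × Int)) (out : Int) : Prop := out = determinate_mode_alt filter_settings
instance (filter_settings : List (String × Int)) (out : Int) : Decidable (Spec_determinate_mode filter_settings out) := by unfold Spec_determinate_mode; infer_instance

-- ===== CLAIM (what is proved, stated in full; the proofs are below) =====
def Claim_equal_determinate_mode : Prop := ∀ (filter_settings : List (String × Int)), Dom_determinate_mode filter_settings → Pre_determinate_mode filter_settings → Spec_determinate_mode filter_settings (determinate_mode filter_settings)

-- ===== LEMMAS AND PROOFS =====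

-- A-side: once the mode is fixed to 0 (and no 1 follows) the loop keeps it.
theorem dmLoopA_keep0 (l : List Int) (h1 : (1 : Int) ∉ l) :
    dmLoopA (some 0) l = some (some 0) := by
  induction l with
  | nil => rfl
  | cons a rest ih =>
    simp only [List.mem_cons, not_or] at h1
    by_cases ha : a = 0
    · subst ha; simp [dmLoopA, ih h1.2]
    · have hv : ¬ (a = 1 ∨ a = 0) := by
        rintro (h | h)
        · exact h1.1 h.symm
        · exact ha h
      simp [dmLoopA, hv, ih h1.2]

theorem dmLoopA_keep1 (l : List Int) (h0 : (0 : Int) ∉ l) :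
    dmLoopA (some 1) l = some (some 1) := by
  induction l with
  | nil => rfl
  | cons a rest ih =>
    simp only [List.mem_cons, not_or] at h0
    by_cases ha : a = 1
    · subst ha; simp [dmLoopA, ih h0.2]
    · have hv : ¬ (a = 1 ∨ a = 0) := by
        rintro (h | h)
        · exact ha h
        · exact h0.1 h.symm
      simp [dmLoopA, hv, ih h0.2]

-- Characterisation of A's loop under Pre_: the result is determined by which of 0/1 occurs.
theorem dmLoopA_char (l : List Int) (hpre : ¬ ((0 : Int) ∈ l ∧ (1 : Int) ∈ l)) :
    dmLoopA none l =
      some (if (0 : Int) ∈ l then some 0 else if (1 : Int) ∈ l then some 1 else none) := by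
  induction l with
  | nil => rfl
  | cons a rest ih =>
    by_cases ha0 : a = 0
    · subst ha0
      have h1 : (1 : Int) ∉ (0 : Int) :: rest := fun h => hpre ⟨List.mem_cons_self, h⟩
      simp only [List.mem_cons, not_or] at h1
      simp [dmLoopA, dmLoopA_keep0 rest h1.2]
    · by_cases ha1 : a = 1
      · subst ha1
        have h0 : (0 : Int) ∉ (1 : Int) :: rest := fun h => hpre ⟨h, List.mem_cons_self⟩
        simp only [List.mem_cons, not_or] at h0
        have h0r : (0 : Int) ∉ rest := h0.2
        simp [dmLoopA, dmLoopA_keep1 rest h0r, h0r]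
      · have hpre' : ¬ ((0 : Int) ∈ rest ∧ (1 : Int) ∈ rest) := fun ⟨x, y⟩ =>
          hpre ⟨List.mem_cons_of_mem _ x, List.mem_cons_of_mem _ y⟩
        have hv : ¬ (a = 1 ∨ a = 0) := by tauto
        have ha0' : ¬ (0 : Int) = a := fun h => ha0 h.symm
        have ha1' : ¬ (1 : Int) = a := fun h => ha1 h.symm
        simp [dmLoopA, hv, ih hpre', ha0', ha1']

-- ===== VERDICT (by name: the statement is the Claim_ definition above) =====
theorem determinate_mode_spec : Claim_equal_determinate_mode := by
  intro fs _ hpre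
  unfold Spec_determinate_mode determinate_mode determinate_mode_alt
  rw [dmLoopA_char _ hpre]
  by_cases h0 : (0 : Int) ∈ fs.map Prod.snd
  · have h1 : (1 : Int) ∉ fs.map Prod.snd := fun h => hpre ⟨h0, h⟩
    simp [h0, h1]
  · by_cases h1 : (1 : Int) ∈ fs.map Prod.snd
    · simp [h0, h1]
    · simp [h0, h1]
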